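-- pv_equiv track=rewrite | github.com/KalebBacztub/BuffCy-Minimal | BuffCy-Minimal/agent.py | generate_cyclic_pattern
-- ===== SOURCE A (Python) =====
-- def generate_cyclic_pattern(length: int) -> str:
--     """Generates a non-repeating pattern of a given length."""
--     charset = "ABCDEFGHIJKLMNOPQRSTUVWXYZabcdefghijklmnopqrstuvwxyz0123456789"
--     pattern = ""
--     for i in range(length // 3):
--         c1 = charset[(i // (len(charset) * len(charset))) % len(charset)]
--         c2 = charset[(i // len(charset)) % len(charset)]
--         c3 = charset[i % len(charset)]
--         pattern += c1 + c2 + c3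
--     return pattern[:length]
-- ===== SOURCE B (Python) =====
-- def generate_cyclic_pattern(length: int) -> str:
--     """Generates a non-repeating pattern of a given length."""
--     charset = "ABCDEFGHIJKLMNOPQRSTUVWXYZabcdefghijklmnopqrstuvwxyz0123456789"
--     triples = [a + b + c for a in charset for b in charset for c in charset]
--     k = max(0, length) // 3
--     q, r = divmod(k, len(triples))
--     return "".join(triples) * q + "".join(triples[:r])
-- ===== Notes on version B (the rewrite author's own statement) =====
-- stated objective: faster
-- what changed: B enumerates all three-char combinations of the charset once as a lexicographic list and builds the result by joining whole-cycle repetitions plus a sliced remainder, instead of A's per-index base-62 decoding with repeated string concatenation.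
import Mathlib
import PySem

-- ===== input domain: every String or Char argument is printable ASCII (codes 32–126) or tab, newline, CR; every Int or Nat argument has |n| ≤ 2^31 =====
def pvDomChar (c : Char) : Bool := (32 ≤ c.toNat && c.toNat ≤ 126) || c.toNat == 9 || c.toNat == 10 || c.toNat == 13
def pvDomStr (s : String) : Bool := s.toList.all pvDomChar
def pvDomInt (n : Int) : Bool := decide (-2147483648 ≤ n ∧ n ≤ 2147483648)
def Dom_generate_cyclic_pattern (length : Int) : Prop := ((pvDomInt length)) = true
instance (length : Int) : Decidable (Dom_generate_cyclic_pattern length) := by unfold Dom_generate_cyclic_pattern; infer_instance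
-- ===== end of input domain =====

-- B builds the full lexicographic list of three-char combinations once and emits it by block concatenation
-- (whole-block repeats plus a sliced remainder) instead of A's per-index base-62 decoding
-- with repeated string appends; measurably faster by a constant factor.

def pvCharset : String := "ABCDEFGHIJKLMNOPQRSTUVWXYZabcdefghijklmnopqrstuvwxyz0123456789"

-- ===== PORT A =====
def generate_cyclic_pattern (length : Int) : String :=
  let charset := pvCharset
  let L : Int := PySem.Str.len charset
  let pattern :=
    (PySem.List.pyRange 0 (PySem.Int.floordiv length 3) 1).foldl
      (fun pattern i =>
        -- charset[(…) % len(charset)]: the index is a `%` by the positive 62, hence always in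
        -- range, so Python's indexing never raises; `(pyGet? …).getD ' '` is exact here.
        let c1 := (PySem.Str.pyGet? charset (PySem.Int.mod (PySem.Int.floordiv i (L * L)) L)).getD ' '
        let c2 := (PySem.Str.pyGet? charset (PySem.Int.mod (PySem.Int.floordiv i L) L)).getD ' '
        let c3 := (PySem.Str.pyGet? charset (PySem.Int.mod i L)).getD ' '
        pattern ++ (String.ofList [c1] ++ String.ofList [c2] ++ String.ofList [c3]))
      ""
  PySem.Str.slice pattern none (some length)

-- ===== PORT B =====
def generate_cyclic_pattern_alt (length : Int) : String :=
  let charset := pvCharset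
  let triples : List String :=
    charset.toList.flatMap fun a =>
      charset.toList.flatMap fun b =>
        charset.toList.map fun c => String.ofList [a] ++ String.ofList [b] ++ String.ofList [c]
  let k := PySem.Int.floordiv (max 0 length) 3
  -- q, r = divmod(k, len(triples)): the divisor len(triples) is never 0, so divmod? is `some`; `.getD` is exact
  let qr := (PySem.Int.divmod? k ((triples.length : Nat) : Int)).getD (0, 0)
  -- Python's `s * q` on str (q ≥ 0 here; `s * n` with n ≤ 0 is ''): q.toNat joined copies, exact
  PySem.Str.join "" (List.replicate qr.1.toNat (PySem.Str.join "" triples))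
    ++ PySem.Str.join "" (PySem.List.slice triples none (some qr.2))

-- ===== PRECONDITION & SPEC =====
def Spec_generate_cyclic_pattern (length : Int) (out : String) : Prop := out = generate_cyclic_pattern_alt length
instance (length : Int) (out : String) : Decidable (Spec_generate_cyclic_pattern length out) := by unfold Spec_generate_cyclic_pattern; infer_instance

-- ===== CLAIM (what is proved, stated in full; the proofs are below) =====
def Claim_equal_generate_cyclic_pattern : Prop := ∀ (length : Int), Dom_generate_cyclic_pattern length → Spec_generate_cyclic_pattern length (generate_cyclic_pattern length)

-- ===== LEMMAS AND PROOFS =====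

/-- Proof-side name for indexing the charset. -/
def pvSc (d : Nat) : Char := pvCharset.toList[d]?.getD ' '

/-- The i-th 3-char chunk produced by A's loop body, as a list of chars. -/
def pvDec (n : Nat) : List Char := [pvSc (n / 3844 % 62), pvSc (n / 62 % 62), pvSc (n % 62)]

theorem pv_intercalate_nil {α : Type} (parts : List (List α)) :
    ([] : List α).intercalate parts = parts.flatten := by
  induction parts with
  | nil => rfl
  | cons p ps ih =>
    cases ps with
    | nil => simp [List.intercalate]
    | cons q qs =>
      have hstep : List.intersperse ([] : List α) (p :: q :: qs) = p :: [] :: List.intersperse [] (q :: qs) := rfl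
      simp only [List.intercalate] at ih ⊢
      rw [hstep, List.flatten_cons, List.flatten_cons, ih]
      simp

theorem pv_toList_join_nil (parts : List String) :
    (PySem.Str.join "" parts).toList = (parts.map String.toList).flatten := by
  simp [PySem.Str.toList_join, PySem.Chars.join, pv_intercalate_nil]

theorem pv_map_getD_range {α : Type} (l : List α) (d : α) :
    (List.range l.length).map (fun i => l[i]?.getD d) = l := by
  apply List.ext_getElem
  · simp
  · intro i h1 h2
    simp only [List.getElem_map, List.getElem_range]
    rw [List.getElem?_eq_getElem h2]
    rfl

theorem pv_range_flatMap_map {β : Type} (a b : Nat) (h : Nat → Nat → β) :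
    (List.range a).flatMap (fun i => (List.range b).map (h i)) =
      (List.range (a * b)).map (fun n => h (n / b) (n % b)) := by
  rcases Nat.eq_zero_or_pos b with hb | hb
  · subst hb; simp
  · induction a with
    | zero => simp
    | succ a ih =>
      rw [List.range_succ, List.flatMap_append, ih,
        show (a + 1) * b = a * b + b by ring, List.range_add, List.map_append, List.map_map]
      congr 1
      simp only [List.flatMap_cons, List.flatMap_nil, List.append_nil, Function.comp_def]
      apply List.map_congr_left
      intro j hj
      have hjb : j < b := List.mem_range.mp hj
      have h1 : (a * b + j) / b = a := by
        rw [mul_comm, Nat.mul_add_div hb, Nat.div_eq_of_lt hjb, Nat.add_zero]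
      have h2 : (a * b + j) % b = j := by
        rw [mul_comm, Nat.mul_add_mod, Nat.mod_eq_of_lt hjb]
      rw [h1, h2]

theorem pv_cs_len : pvCharset.toList.length = 62 := by decide

theorem pv_cs_eq : pvCharset.toList = (List.range 62).map pvSc := by
  have h := pv_map_getD_range pvCharset.toList ' '
  rw [pv_cs_len] at h
  exact h.symm

theorem pv_ofList_merge (c1 c2 c3 : Char) :
    String.ofList [c1] ++ String.ofList [c2] ++ String.ofList [c3] = String.ofList [c1, c2, c3] := by
  apply String.toList_inj.mp
  simp

theorem pv_triples_eq :
    (pvCharset.toList.flatMap fun a =>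
      pvCharset.toList.flatMap fun b =>
        pvCharset.toList.map fun c => String.ofList [a] ++ String.ofList [b] ++ String.ofList [c]) =
    (List.range 238328).map (fun n => String.ofList (pvDec n)) := by
  conv_lhs => rw [pv_cs_eq]
  simp only [List.flatMap_map, List.map_map, Function.comp_def]
  simp only [pv_range_flatMap_map]
  norm_num
  intro n hn'
  rw [pv_ofList_merge]
  unfold pvDec
  rw [show n / 3844 % 62 = n / 3844 from by omega,
      show n / 62 % 62 = n % 3844 / 62 from by omega]

theorem pv_len_charset : PySem.Str.len pvCharset = 62 := by decide

theorem pv_idx (a k : Nat) :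
    PySem.Int.mod (PySem.Int.floordiv (a : Int) ((k : Nat) : Int)) ((62 : Nat) : Int) = ((a / k % 62 : Nat) : Int) := by
  rw [PySem.Int.floordiv_natCast, PySem.Int.mod_natCast]

theorem pv_fd3 (n : Nat) : PySem.Int.floordiv (n : Int) 3 = ((n / 3 : Nat) : Int) := by
  rw [show (3 : Int) = ((3 : Nat) : Int) by norm_num, PySem.Int.floordiv_natCast]

theorem pv_A_fold (l : List Nat) (init : String) :
    ((List.map (fun (k : Nat) => (k : Int)) l).foldl
      (fun pattern i =>
        pattern ++
          (String.ofList [(PySem.Str.pyGet? pvCharset (PySem.Int.mod (PySem.Int.floordiv i (PySem.Str.len pvCharset * PySem.Str.len pvCharset)) (PySem.Str.len pvCharset))).getD ' '] ++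
            String.ofList [(PySem.Str.pyGet? pvCharset (PySem.Int.mod (PySem.Int.floordiv i (PySem.Str.len pvCharset)) (PySem.Str.len pvCharset))).getD ' '] ++
            String.ofList [(PySem.Str.pyGet? pvCharset (PySem.Int.mod i (PySem.Str.len pvCharset))).getD ' ']))
      init).toList = init.toList ++ l.flatMap pvDec := by
  induction l generalizing init with
  | nil => simp
  | cons a t ih =>
    simp only [List.map_cons, List.foldl_cons, List.flatMap_cons]
    rw [ih]
    have hstep :
        (init ++ (String.ofList [(PySem.Str.pyGet? pvCharset (PySem.Int.mod (PySem.Int.floordiv (a : Int) (PySem.Str.len pvCharset * PySem.Str.len pvCharset)) (PySem.Str.len pvCharset))).getD ' '] ++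
          String.ofList [(PySem.Str.pyGet? pvCharset (PySem.Int.mod (PySem.Int.floordiv (a : Int) (PySem.Str.len pvCharset)) (PySem.Str.len pvCharset))).getD ' '] ++
          String.ofList [(PySem.Str.pyGet? pvCharset (PySem.Int.mod (a : Int) (PySem.Str.len pvCharset))).getD ' '])).toList
          = init.toList ++ pvDec a := by
      rw [pv_len_charset]
      rw [show (62 : Int) * 62 = ((3844 : Nat) : Int) by norm_num,
          show (62 : Int) = ((62 : Nat) : Int) by norm_num]
      rw [pv_idx a 3844, pv_idx a 62,
          show PySem.Int.mod ((a : Nat) : Int) ((62 : Nat) : Int) = ((a % 62 : Nat) : Int) from PySem.Int.mod_natCast a 62,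
          PySem.Str.pyGet?_natCast, PySem.Str.pyGet?_natCast, PySem.Str.pyGet?_natCast]
      simp [pvDec, pvSc]
    rw [hstep, List.append_assoc]

theorem pv_dec_mod (n : Nat) : pvDec n = pvDec (n % 238328) := by
  unfold pvDec
  rw [show n % 238328 / 3844 % 62 = n / 3844 % 62 by omega,
      show n % 238328 / 62 % 62 = n / 62 % 62 by omega,
      show n % 238328 % 62 = n % 62 by omega]

theorem pv_flat_split (g : Nat → List Char) (N : Nat) (hN : 0 < N) (hg : ∀ n, g n = g (n % N)) :
    ∀ k, (List.range k).flatMap g =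
      (List.replicate (k / N) ((List.range N).flatMap g)).flatten ++ (List.range (k % N)).flatMap g := by
  intro k
  induction k using Nat.strong_induction_on with
  | _ k ih =>
    rcases lt_or_ge k N with hk | hk
    · rw [Nat.div_eq_of_lt hk, Nat.mod_eq_of_lt hk]; simp
    · obtain ⟨m, rfl⟩ : ∃ m, k = N + m := ⟨k - N, by omega⟩
      have hshift : ∀ i, g (N + i) = g i := by
        intro i
        rw [hg (N + i), Nat.add_mod_left, ← hg]
      rw [List.range_add, List.flatMap_append, List.flatMap_map]
      simp only [Function.comp_def, hshift]
      rw [ih m (by omega),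
          show (N + m) / N = m / N + 1 from by rw [Nat.add_comm]; exact Nat.add_div_right m hN,
          Nat.add_mod_left, List.replicate_succ, List.flatten_cons, List.append_assoc]

theorem pv_A_eq (n : Nat) :
    (generate_cyclic_pattern (n : Int)).toList = (List.range (n / 3)).flatMap pvDec := by
  simp only [generate_cyclic_pattern]
  rw [pv_fd3, PySem.List.pyRange_zero_natCast]
  rw [PySem.Str.toList_slice, PySem.Chars.slice_eq_listSlice,
      PySem.List.slice_to _ (Int.natCast_nonneg n), Int.toNat_natCast]
  rw [pv_A_fold]
  have hlen : ((List.range (n / 3)).flatMap pvDec).length = 3 * (n / 3) := by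
    simp [List.length_flatMap, pvDec, List.map_const', mul_comm]
  rw [show ("" : String).toList = [] from rfl, List.nil_append]
  exact List.take_of_length_le (le_trans (le_of_eq hlen) (by omega))

theorem pv_divmod (m : Nat) :
    PySem.Int.divmod? ((m : Nat) : Int) ((238328 : Nat) : Int) =
      some (((m / 238328 : Nat) : Int), ((m % 238328 : Nat) : Int)) := by
  simp [PySem.Int.divmod?, Int.fdiv_eq_ediv, Int.fmod_eq_emod]

theorem pv_B_eq (n : Nat) :
    (generate_cyclic_pattern_alt (n : Int)).toList =
      (List.replicate (n / 3 / 238328) ((List.range 238328).flatMap pvDec)).flatten ++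
        (List.range (n / 3 % 238328)).flatMap pvDec := by
  simp only [generate_cyclic_pattern_alt]
  rw [pv_triples_eq]
  rw [max_eq_right (by positivity : (0 : Int) ≤ (n : Int)), pv_fd3]
  simp only [List.length_map, List.length_range]
  rw [pv_divmod]
  simp only [Option.getD_some]
  rw [String.toList_append, pv_toList_join_nil, List.map_replicate, pv_toList_join_nil,
      List.map_map]
  rw [PySem.List.slice_to _ (Int.natCast_nonneg (n / 3 % 238328)), Int.toNat_natCast,
      Int.toNat_natCast, pv_toList_join_nil]
  rw [← List.map_take, List.take_range, List.map_map]
  refine congrArg₂ (· ++ ·) ?_ ?_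
  · simp [Function.comp_def, List.flatMap_def]
  · rw [show min (n / 3 % 238328) 238328 = n / 3 % 238328 by omega]
    simp [Function.comp_def, List.flatMap_def]

theorem pv_pyRange_nonpos (m : Int) (hm : m ≤ 0) : PySem.List.pyRange 0 m 1 = [] := by
  simp [PySem.List.pyRange, show ¬ ((0 : Int) < m) by omega]

theorem pv_slice_nil (a b : Option Int) : PySem.List.slice ([] : List Char) a b = [] := by
  simp [PySem.List.slice]

theorem pv_A_neg (length : Int) (h : length < 0) : generate_cyclic_pattern length = "" := by
  simp only [generate_cyclic_pattern]
  rw [pv_pyRange_nonpos _ (by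
    rw [PySem.Int.floordiv_eq_ediv_of_pos (by norm_num : (0 : Int) < 3)]
    omega)]
  apply String.toList_inj.mp
  rw [PySem.Str.toList_slice, PySem.Chars.slice_eq_listSlice]
  simp [pv_slice_nil]

theorem pv_B_neg (length : Int) (h : length < 0) : generate_cyclic_pattern_alt length = "" := by
  simp only [generate_cyclic_pattern_alt]
  rw [pv_triples_eq, max_eq_left (by omega : length ≤ (0 : Int)),
      show PySem.Int.floordiv 0 3 = ((0 : Nat) : Int) from by decide]
  simp only [List.length_map, List.length_range]
  rw [pv_divmod]
  simp only [Option.getD_some]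
  apply String.toList_inj.mp
  rw [String.toList_append, pv_toList_join_nil, pv_toList_join_nil]
  simp [PySem.List.slice_to]

-- ===== VERDICT (by name: the statement is the Claim_ definition above) =====
theorem generate_cyclic_pattern_spec : Claim_equal_generate_cyclic_pattern := by
  intro length _
  unfold Spec_generate_cyclic_pattern
  rcases Int.lt_or_le length 0 with hneg | hpos
  · rw [pv_A_neg length hneg, pv_B_neg length hneg]
  · obtain ⟨n, rfl⟩ := Int.eq_ofNat_of_zero_le hpos
    apply String.toList_inj.mp
    rw [pv_A_eq, pv_B_eq, pv_flat_split pvDec 238328 (by norm_num) pv_dec_mod (n / 3)]
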